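-- pv_equiv track=rewrite | github.com/heyhenry/python-problemsolving | 2026/April/Problem_Sets_Again_Again/Pset_02/max_prime.py | max_prime
-- ===== SOURCE A (Python) =====
-- def max_prime(table : list[list[int]]) -> int:
--
--     def is_prime(n : int) -> bool:
--         if n <= 1:
--             return False
--         for i in range(2, int(n**0.5) + 1):
--             if n % i == 0:
--                 return False
--         return True
--
--     max_num = -1
--     for row in table:
--         for i in row:
--             if is_prime(i) and i > max_num:
--                 max_num = i
--     return max_num
-- ===== SOURCE B (Python) =====
-- def max_prime(table: list[list[int]]) -> int:
--     def is_prime(n: int) -> bool: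
--         if n <= 1:
--             return False
--         for i in range(2, int(n**0.5) + 1):
--             if n % i == 0:
--                 return False
--         return True
--
--     flat = sorted((x for row in table for x in row), reverse=True)
--     for v in flat:
--         if is_prime(v):
--             return v
--     return -1
-- ===== Notes on version B (the rewrite author's own statement) =====
-- stated objective: alternative
-- what changed: Instead of scanning every cell while maintaining a running maximum, B flattens the table, sorts it in descending order, and returns the first prime found (early exit), -1 if none.
import Mathlib
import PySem

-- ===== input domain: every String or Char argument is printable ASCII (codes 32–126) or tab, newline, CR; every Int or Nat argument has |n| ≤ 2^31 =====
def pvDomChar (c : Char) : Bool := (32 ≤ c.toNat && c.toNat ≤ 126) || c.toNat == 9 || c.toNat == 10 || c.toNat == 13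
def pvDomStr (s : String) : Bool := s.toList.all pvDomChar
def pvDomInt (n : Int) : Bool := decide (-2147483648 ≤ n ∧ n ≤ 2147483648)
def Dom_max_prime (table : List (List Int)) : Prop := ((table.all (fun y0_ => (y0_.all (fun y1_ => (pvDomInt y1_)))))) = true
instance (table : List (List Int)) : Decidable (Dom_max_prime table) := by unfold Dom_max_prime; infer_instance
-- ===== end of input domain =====

-- B replaces A's running-maximum double scan by flatten + descending sort + first-prime early exit; objective: alternative.

-- ===== PORT A =====
-- is_prime, shared helper of both Pythons (identical text in Source A and Source B).
-- int(n**0.5) is ported as Nat.sqrt n.toNat: exact for 2 ≤ n ≤ 2^31 (double sqrt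
-- is correctly rounded and non-squares below 2^31 are far enough from integers).
def pvIsPrime (n : Int) : Bool :=
  if n ≤ 1 then false
  else (PySem.List.pyRange 2 ((Nat.sqrt n.toNat : Int) + 1) 1).all
         (fun i => !(PySem.Int.mod n i == 0))

def max_prime (table : List (List Int)) : Int :=
  table.foldl
    (fun max_num row =>
      row.foldl (fun max_num i =>
        if pvIsPrime i && decide (i > max_num) then i else max_num) max_num)
    (-1)

-- ===== PORT B =====
def pvFirstPrime : List Int → Int
  | [] => -1
  | v :: rest => if pvIsPrime v then v else pvFirstPrime rest

def max_prime_alt (table : List (List Int)) : Int :=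
  pvFirstPrime (PySem.List.sorted (table.flatMap (fun row => row)) (fun x => x) true)

-- ===== PRECONDITION & SPEC =====
def Spec_max_prime (table : List (List Int)) (out : Int) : Prop := out = max_prime_alt table
instance (table : List (List Int)) (out : Int) : Decidable (Spec_max_prime table out) := by unfold Spec_max_prime; infer_instance

-- ===== CLAIM (what is proved, stated in full; the proofs are below) =====
def Claim_equal_max_prime : Prop := ∀ (table : List (List Int)), Dom_max_prime table → Spec_max_prime table (max_prime table)

-- ===== LEMMAS AND PROOFS =====

theorem prime_gt_one {n : Int} (h : pvIsPrime n = true) : 1 < n := by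
  unfold pvIsPrime at h
  by_cases hn : n ≤ 1
  · simp [hn] at h
  · omega

def pvStep (m i : Int) : Int := if pvIsPrime i && decide (i > m) then i else m

theorem max_prime_eq_flat (table : List (List Int)) :
    max_prime table = (table.flatMap (fun row => row)).foldl pvStep (-1) := by
  unfold max_prime
  rw [List.foldl_flatMap]
  rfl

theorem foldl_step_eq_filter_max (xs : List Int) :
    ∀ m, xs.foldl pvStep m = (xs.filter pvIsPrime).foldl max m := by
  induction xs with
  | nil => intro m; rfl
  | cons a t ih =>
    intro m
    by_cases hp : pvIsPrime a = true
    · simp only [List.foldl_cons, List.filter_cons, hp, if_pos, pvStep]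
      rw [ih]
      congr 1
      by_cases hgt : a > m
      · simp [hgt]; omega
      · simp [hgt]; omega
    · simp [pvStep, hp, ih]

theorem foldl_max_const (t : List Int) : ∀ c, (∀ x ∈ t, x ≤ c) → t.foldl max c = c := by
  induction t with
  | nil => intro c _; rfl
  | cons a s ih =>
    intro c hb
    have ha : a ≤ c := hb a (by simp)
    simp only [List.foldl_cons]
    rw [max_eq_left ha]
    exact ih c (fun x hx => hb x (by simp [hx]))

theorem foldl_max_eq (l : List Int) :
    ∀ m h, h ∈ l → (∀ x ∈ l, x ≤ h) → m ≤ h → l.foldl max m = h := by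
  induction l with
  | nil => intro m h hm; simp at hm
  | cons a t ih =>
    intro m h hmem hb hl
    simp only [List.foldl_cons]
    rcases List.mem_cons.mp hmem with rfl | hmemt
    · by_cases hht : h ∈ t
      · exact ih _ h hht (fun x hx => hb x (by simp [hx])) (by simp [hl])
      · rw [max_eq_right hl]
        exact foldl_max_const t h (fun x hx => hb x (by simp [hx]))
    · exact ih _ h hmemt (fun x hx => hb x (by simp [hx]))
        (max_le hl (hb a (by simp)))

theorem firstPrime_eq_head_filter (ys : List Int) :
    pvFirstPrime ys = match ys.filter pvIsPrime with | [] => -1 | h :: _ => h := by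
  induction ys with
  | nil => rfl
  | cons a t ih =>
    by_cases hp : pvIsPrime a = true
    · simp [pvFirstPrime, hp]
    · simp [pvFirstPrime, hp, ih]

theorem max_prime_spec_aux (table : List (List Int)) :
    max_prime table = max_prime_alt table := by
  rw [max_prime_eq_flat]
  set xs := table.flatMap (fun row => row) with hxs
  unfold max_prime_alt
  rw [← hxs]
  set ys := PySem.List.sorted xs (fun x => x) true with hys
  have hperm : ys.Perm xs := PySem.List.sorted_perm xs (fun x => x) true
  have hpf : (ys.filter pvIsPrime).Perm (xs.filter pvIsPrime) := hperm.filter _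
  have hpw : ys.Pairwise (fun a b => b ≤ a) := by
    have := PySem.List.sorted_pairwise_rev (κ := Int) xs (fun x => x)
    simpa using this
  rw [foldl_step_eq_filter_max, firstPrime_eq_head_filter]
  have hpwf : (ys.filter pvIsPrime).Pairwise (fun a b => b ≤ a) := hpw.filter _
  cases hf : ys.filter pvIsPrime with
  | nil =>
    have h0 : ([] : List Int).Perm (xs.filter pvIsPrime) := hf ▸ hpf
    rw [← h0.nil_eq]; rfl
  | cons h t =>
    have hprime : pvIsPrime h = true := by
      have : h ∈ ys.filter pvIsPrime := by rw [hf]; simp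
      exact (List.mem_filter.mp this).2
    have hmem : h ∈ xs.filter pvIsPrime := hpf.mem_iff.mp (by rw [hf]; simp)
    have hub : ∀ x ∈ xs.filter pvIsPrime, x ≤ h := by
      intro x hx
      have hx' : x ∈ ys.filter pvIsPrime := hpf.mem_iff.mpr hx
      rw [hf] at hx'
      rcases List.mem_cons.mp hx' with rfl | hxt
      · exact le_refl x
      · rw [hf] at hpwf
        exact (List.pairwise_cons.mp hpwf).1 x hxt
    exact foldl_max_eq _ (-1) h hmem hub (by have := prime_gt_one hprime; omega)

-- ===== VERDICT (by name: the statement is the Claim_ definition above) =====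
theorem max_prime_spec : Claim_equal_max_prime := by
  intro table _
  unfold Spec_max_prime
  exact max_prime_spec_aux table
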